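-- pv_equiv track=rewrite | github.com/jtlinna/advent-of-code-2025 | 02-gift-shop/02-gift-shop.py | get_ids_with_digit_sequence_repeating_twice
-- ===== SOURCE A (Python) =====
-- def get_ids_with_digit_sequence_repeating_twice(start, end):
--     result = []
--     for id in range(start, end + 1):
--         id_str =  str(id)
--         id_len = len(id_str)
--         if id_len % 2 != 0: continue
--         half_len = id_len // 2
--         first_half = id_str[:half_len]
--         second_half = id_str[half_len:]
--         if first_half == second_half:
--             result.append(id)
--     return result
-- ===== SOURCE B (Python) =====
-- def get_ids_with_digit_sequence_repeating_twice(start, end):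
--     # Generate candidates directly: every qualifying id is fh * (10**k + 1)
--     # for a k-digit first half fh; walk k upward and keep candidates in range.
--     result = []
--     k = 1
--     while 10 ** (2 * k - 1) + 10 ** (k - 1) <= end:  # smallest 2k-digit candidate
--         m = 10 ** k + 1
--         lo = max(10 ** (k - 1), -(-start // m))      # ceil(start / m)
--         hi = min(10 ** k - 1, end // m)
--         for fh in range(lo, hi + 1):
--             result.append(fh * m)
--         k += 1
--     return result
-- ===== Notes on version B (the rewrite author's own statement) =====
-- stated objective: faster
-- what changed: Instead of scanning every id in [start, end] and comparing string halves, B constructs the qualifying ids directly as fh*(10^k+1) for each k-digit first half fh, clamping fh to the range, so the work is proportional to the number of answers (about sqrt(end)) rather than to end-start.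
import Mathlib
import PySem

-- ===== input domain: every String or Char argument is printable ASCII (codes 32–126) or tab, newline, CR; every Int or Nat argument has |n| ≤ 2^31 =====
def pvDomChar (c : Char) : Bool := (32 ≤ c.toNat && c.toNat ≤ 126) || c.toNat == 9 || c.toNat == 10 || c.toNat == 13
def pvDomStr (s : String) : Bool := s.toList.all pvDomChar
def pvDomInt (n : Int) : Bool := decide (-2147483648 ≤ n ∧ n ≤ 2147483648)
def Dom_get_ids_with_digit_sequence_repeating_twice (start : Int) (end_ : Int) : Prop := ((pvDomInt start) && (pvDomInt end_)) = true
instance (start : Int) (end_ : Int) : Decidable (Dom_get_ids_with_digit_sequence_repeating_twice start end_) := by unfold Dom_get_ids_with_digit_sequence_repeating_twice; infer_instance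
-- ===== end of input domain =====

-- B replaces A's scan of every id in [start, end] by direct construction of the
-- qualifying ids fh*(10^k+1) (fh a k-digit first half), clamped to the range: faster (asymptotic).


-- ===== PORT A =====
def get_ids_with_digit_sequence_repeating_twice (start : Int) (end_ : Int) : List Int :=
  (PySem.List.pyRange start (end_ + 1) 1).foldl (fun result id =>
    let id_str := PySem.Int.toStr id
    let id_len := PySem.Str.len id_str
    if PySem.Int.mod id_len 2 ≠ 0 then result    -- continue
    else
      let half_len := PySem.Int.floordiv id_len 2
      let first_half := PySem.Str.slice id_str none (some half_len)
      let second_half := PySem.Str.slice id_str (some half_len) none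
      if first_half == second_half then result ++ [id] else result) []

-- ===== PORT B =====
-- the while loop of Source B: k counts up from 1 while the smallest 2k-digit candidate is ≤ end
def pvAltLoop (start : Int) (end_ : Int) (k : Nat) : List Int :=
  if _h : (10:Int) ^ (2*k - 1) + 10 ^ (k - 1) ≤ end_ then
    let m : Int := 10 ^ k + 1
    let lo : Int := max ((10:Int) ^ (k - 1)) (-(PySem.Int.floordiv (-start) m))
    let hi : Int := min ((10:Int) ^ k - 1) (PySem.Int.floordiv end_ m)
    ((PySem.List.pyRange lo (hi + 1) 1).map (fun fh => fh * m)) ++ pvAltLoop start end_ (k+1)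
  else []
termination_by (end_ + 1 - 10 ^ (2*k - 1)).toNat
decreasing_by
  have h1 : (10:Int) ^ (2*k - 1) < 10 ^ (2*(k+1) - 1) := by
    apply pow_lt_pow_right₀ (by norm_num) (by omega)
  have h2 : (0:Int) < 10 ^ (k - 1) := pow_pos (by norm_num) _
  omega

def get_ids_with_digit_sequence_repeating_twice_alt (start : Int) (end_ : Int) : List Int :=
  pvAltLoop start end_ 1

-- ===== PRECONDITION & SPEC =====
def Spec_get_ids_with_digit_sequence_repeating_twice (start : Int) (end_ : Int) (out : List Int) : Prop := out = get_ids_with_digit_sequence_repeating_twice_alt start end_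
instance (start : Int) (end_ : Int) (out : List Int) : Decidable (Spec_get_ids_with_digit_sequence_repeating_twice start end_ out) := by unfold Spec_get_ids_with_digit_sequence_repeating_twice; infer_instance

-- ===== CLAIM (what is proved, stated in full; the proofs are below) =====
def Claim_equal_get_ids_with_digit_sequence_repeating_twice : Prop := ∀ (start : Int) (end_ : Int), Dom_get_ids_with_digit_sequence_repeating_twice start end_ → Spec_get_ids_with_digit_sequence_repeating_twice start end_ (get_ids_with_digit_sequence_repeating_twice start end_)

-- ===== LEMMAS AND PROOFS =====

-- A's per-id test, extracted for the proofs
def pvTest (id : Int) : Bool :=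
  let id_str := PySem.Int.toStr id
  let id_len := PySem.Str.len id_str
  if PySem.Int.mod id_len 2 ≠ 0 then false
  else
    let half_len := PySem.Int.floordiv id_len 2
    PySem.Str.slice id_str none (some half_len) == PySem.Str.slice id_str (some half_len) none

-- "id qualifies": id = fh * (10^k + 1) for a k-digit first half fh
def pvGood (id : Int) : Prop :=
  ∃ k : Nat, ∃ fh : Int, 1 ≤ k ∧ (10:Int) ^ (k-1) ≤ fh ∧ fh < 10 ^ k ∧ id = fh * (10 ^ k + 1)

-- decimal digits of n, most significant first (structural version of Nat.toDigits 10)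
def pvDigs (n : Nat) : List Char :=
  if n < 10 then [Nat.digitChar n]
  else pvDigs (n / 10) ++ [Nat.digitChar (n % 10)]
termination_by n
decreasing_by omega

-- the h low decimal digits of b, zero-padded to width h
def pvPad : Nat → Nat → List Char
  | 0, _ => []
  | h+1, b => pvPad h (b / 10) ++ [Nat.digitChar (b % 10)]

theorem pvToDigitsCore_eq (f : Nat) : ∀ (n : Nat) (acc : List Char), n < f →
    Nat.toDigitsCore 10 f n acc = pvDigs n ++ acc := by
  induction f with
  | zero => intro n acc h; omega
  | succ f ih =>
    intro n acc h
    rw [Nat.toDigitsCore]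
    by_cases h10 : n / 10 = 0
    · rw [if_pos h10, pvDigs, if_pos (by omega : n < 10), Nat.mod_eq_of_lt (by omega)]
      rfl
    · rw [if_neg h10, ih (n / 10) _ (by omega),
        pvDigs.eq_def n, if_neg (by omega : ¬ n < 10)]
      simp

theorem pvToDigits_eq (n : Nat) : Nat.toDigits 10 n = pvDigs n := by
  simpa using pvToDigitsCore_eq (n+1) n [] (by omega)

theorem pvPad_length (h b : Nat) : (pvPad h b).length = h := by
  induction h generalizing b with
  | zero => rfl
  | succ h ih => simp [pvPad, ih]

theorem pvDigs_length_pos (n : Nat) : 0 < (pvDigs n).length := by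
  unfold pvDigs; split <;> simp

theorem pvDigs_split (h : Nat) : ∀ a b : Nat, 0 < a → b < 10 ^ h →
    pvDigs (a * 10 ^ h + b) = pvDigs a ++ pvPad h b := by
  induction h with
  | zero =>
    intro a b _ hb
    interval_cases b
    simp [pvPad]
  | succ h ih =>
    intro a b ha hb
    have e1 : (10:Nat) ^ (h+1) = 10 ^ h * 10 := pow_succ 10 h
    have e2 : 1 ≤ (10:Nat) ^ h := Nat.one_le_pow _ _ (by norm_num)
    have e3 : 10 ^ (h+1) ≤ a * 10 ^ (h+1) := Nat.le_mul_of_pos_left _ ha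
    rw [pvDigs.eq_def, if_neg (by omega : ¬ a * 10 ^ (h+1) + b < 10)]
    have hdiv : (a * 10 ^ (h+1) + b) / 10 = a * 10 ^ h + b / 10 := by
      rw [e1, show a * (10 ^ h * 10) + b = b + (a * 10 ^ h) * 10 by ring,
        Nat.add_mul_div_right _ _ (by norm_num)]
      omega
    have hmod : (a * 10 ^ (h+1) + b) % 10 = b % 10 := by
      rw [e1, show a * (10 ^ h * 10) + b = b + (a * 10 ^ h) * 10 by ring,
        Nat.add_mul_mod_self_right]
    rw [hdiv, hmod, ih a (b / 10) ha (by omega), pvPad, List.append_assoc]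

theorem pvPad_eq_pvDigs (h : Nat) : ∀ b : Nat, 1 ≤ h → 10 ^ (h-1) ≤ b → b < 10 ^ h →
    pvPad h b = pvDigs b := by
  induction h with
  | zero => intro b h0; omega
  | succ h ih =>
    intro b _ hlo hhi
    by_cases h0 : h = 0
    · subst h0
      norm_num at hlo hhi
      rw [pvPad, pvPad, pvDigs, if_pos (by omega : b < 10),
        Nat.mod_eq_of_lt (by omega)]
      simp
    · have h1 : 1 ≤ h := by omega
      have e : (10:Nat) ^ h = 10 ^ (h-1) * 10 := by
        rw [← pow_succ]; congr 1; omega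
      have e2 : (10:Nat) ^ (h+1) = 10 ^ h * 10 := pow_succ 10 h
      have e3 : 1 ≤ (10:Nat) ^ (h-1) := Nat.one_le_pow _ _ (by norm_num)
      simp only [Nat.add_sub_cancel] at hlo
      rw [pvPad, ih (b / 10) h1 (by omega) (by omega),
        pvDigs.eq_def b, if_neg (by omega : ¬ b < 10)]

theorem pvPad_inj (h : Nat) : ∀ x y : Nat, x < 10 ^ h → y < 10 ^ h →
    pvPad h x = pvPad h y → x = y := by
  induction h with
  | zero => intro x y hx hy _; simp at hx hy; omega
  | succ h ih =>
    intro x y hx hy heq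
    rw [pvPad, pvPad] at heq
    obtain ⟨h1, h2⟩ := List.append_inj heq (by rw [pvPad_length, pvPad_length])
    have hdc : ∀ a : Nat, a < 10 → ∀ b : Nat, b < 10 → Nat.digitChar a = Nat.digitChar b → a = b := by decide
    have e2 : (10:Nat) ^ (h+1) = 10 ^ h * 10 := pow_succ 10 h
    have hd := ih (x / 10) (y / 10) (by omega) (by omega) h1
    have hm : x % 10 = y % 10 := hdc _ (by omega) _ (by omega) (by simpa using h2)
    omega

theorem pvDigs_bounds (n : Nat) (hn : 0 < n) :
    10 ^ ((pvDigs n).length - 1) ≤ n ∧ n < 10 ^ (pvDigs n).length := by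
  induction n using Nat.strong_induction_on with
  | _ n ih =>
    rw [pvDigs.eq_def]
    by_cases h10 : n < 10
    · rw [if_pos h10]; simpa using by omega
    · rw [if_neg h10]
      obtain ⟨l1, l2⟩ := ih (n / 10) (by omega) (by omega)
      have hLpos := pvDigs_length_pos (n / 10)
      simp only [List.length_append, List.length_cons, List.length_nil, Nat.zero_add,
        Nat.add_sub_cancel]
      set L := (pvDigs (n / 10)).length with hL
      have e2 : (10:Nat) ^ L = 10 ^ (L-1) * 10 := by rw [← pow_succ]; congr 1; omega
      have e3 : (10:Nat) ^ (L+1) = 10 ^ L * 10 := pow_succ 10 L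
      omega

theorem pvDigs_no_dash (n : Nat) : '-' ∉ pvDigs n := by
  induction n using Nat.strong_induction_on with
  | _ n ih =>
    have hdc : ∀ m : Nat, m < 10 → Nat.digitChar m ≠ '-' := by decide
    rw [pvDigs.eq_def]
    by_cases h10 : n < 10
    · rw [if_pos h10]
      simp only [List.mem_singleton]
      intro hmem
      exact hdc n h10 hmem.symm
    · rw [if_neg h10]
      simp only [List.mem_append, List.mem_singleton]
      rintro (hmem | hmem)
      · exact ih (n / 10) (by omega) hmem
      · exact hdc _ (Nat.mod_lt _ (by norm_num)) hmem.symm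

theorem pvLenUnique (x p q : Nat) (hp : 1 ≤ p) (hq : 1 ≤ q)
    (h1 : 10 ^ (p-1) ≤ x) (h2 : x < 10 ^ p) (h3 : 10 ^ (q-1) ≤ x) (h4 : x < 10 ^ q) : p = q := by
  rcases Nat.lt_trichotomy p q with hlt | heq | hgt
  · have : (10:Nat) ^ p ≤ 10 ^ (q-1) := Nat.pow_le_pow_right (by norm_num) (by omega)
    omega
  · exact heq
  · have : (10:Nat) ^ q ≤ 10 ^ (p-1) := Nat.pow_le_pow_right (by norm_num) (by omega)
    omega

theorem pvGood_pos (id : Int) (hg : pvGood id) : 0 < id := by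
  obtain ⟨k, fh, hk, hlo, hhi, hv⟩ := hg
  have h1 : (0:Int) < fh := lt_of_lt_of_le (pow_pos (by norm_num) _) hlo
  have h2 : (0:Int) < 10 ^ k + 1 := by positivity
  rw [hv]; exact mul_pos h1 h2

theorem pvTest_iff_lists (id : Int) :
    pvTest id = true ↔ ((PySem.Int.toChars id).length % 2 = 0 ∧
      (PySem.Int.toChars id).take ((PySem.Int.toChars id).length / 2)
        = (PySem.Int.toChars id).drop ((PySem.Int.toChars id).length / 2)) := by
  have hm2 : ∀ L : Nat, PySem.Int.mod (L:Int) 2 = ((L % 2 : Nat) : Int) := fun L => by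
    exact_mod_cast PySem.Int.mod_natCast L 2
  have hd2 : ∀ L : Nat, PySem.Int.floordiv (L:Int) 2 = ((L / 2 : Nat) : Int) := fun L => by
    exact_mod_cast PySem.Int.floordiv_natCast L 2
  unfold pvTest
  simp only [PySem.Str.len_eq, PySem.Int.toList_toStr, hm2, hd2]
  by_cases hpar : (PySem.Int.toChars id).length % 2 = 0
  · rw [if_neg (by simp [hpar])]
    rw [show (((PySem.Int.toChars id).length % 2 = 0) ∧
        ((PySem.Int.toChars id).take ((PySem.Int.toChars id).length / 2)
          = (PySem.Int.toChars id).drop ((PySem.Int.toChars id).length / 2)))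
        ↔ ((PySem.Int.toChars id).take ((PySem.Int.toChars id).length / 2)
          = (PySem.Int.toChars id).drop ((PySem.Int.toChars id).length / 2))
      from and_iff_right hpar]
    rw [beq_iff_eq, String.ext_iff]
    simp only [PySem.Str.toList_slice, PySem.Chars.slice_eq_listSlice,
      PySem.Int.toList_toStr, PySem.List.slice_to_natCast, PySem.List.slice_from_natCast]
  · rw [if_pos (by exact_mod_cast hpar)]
    simp [hpar]

theorem pvTest_iff (id : Int) : pvTest id = true ↔ pvGood id := by
  rw [pvTest_iff_lists]
  rcases lt_trichotomy id 0 with hneg | hz | hpos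
  · have hneg' : PySem.Int.toChars id = '-' :: pvDigs id.natAbs := by
      unfold PySem.Int.toChars; rw [if_pos hneg, pvToDigits_eq]
    rw [hneg']
    constructor
    · rintro ⟨hpar, heq⟩
      exfalso
      set ds := pvDigs id.natAbs with hds
      have hdpos : 0 < ds.length := pvDigs_length_pos _
      simp only [List.length_cons] at hpar heq
      obtain ⟨h', hh'⟩ : ∃ h', (ds.length + 1) / 2 = h' + 1 :=
        ⟨(ds.length + 1) / 2 - 1, by omega⟩
      rw [hh', List.take_succ_cons, List.drop_succ_cons] at heq
      have hmem : '-' ∈ ds.drop h' := heq ▸ List.mem_cons_self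
      exact pvDigs_no_dash _ (List.mem_of_mem_drop hmem)
    · intro hg; exact absurd (pvGood_pos _ hg) (by omega)
  · subst hz
    constructor
    · rintro ⟨hpar, _⟩
      have : (PySem.Int.toChars 0).length = 1 := by decide
      omega
    · intro hg; exact absurd (pvGood_pos _ hg) (by omega)
  · have hn : 0 < id.toNat := by omega
    set n := id.toNat with hnn
    have hid : (n : Int) = id := Int.toNat_of_nonneg (by omega)
    have hcs : PySem.Int.toChars id = pvDigs n := by
      unfold PySem.Int.toChars; rw [if_neg (by omega), pvToDigits_eq]
    rw [hcs]
    obtain ⟨hb1, hb2⟩ := pvDigs_bounds n hn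
    set L := (pvDigs n).length with hLdef
    have hLpos : 0 < L := pvDigs_length_pos n
    constructor
    · rintro ⟨hpar, heq⟩
      set h := L / 2 with hhdef
      have hhpos : 1 ≤ h := by omega
      have hph : (0:Nat) < 10 ^ h := pow_pos (by norm_num) h
      set a := n / 10 ^ h with hadef
      set b := n % 10 ^ h with hbdef
      have hnab : a * 10 ^ h + b = n := by rw [mul_comm]; exact Nat.div_add_mod n (10 ^ h)
      have hbl : b < 10 ^ h := Nat.mod_lt _ hph
      have e1 : (10:Nat) ^ (2*h-1) = 10 ^ (h-1) * 10 ^ h := by rw [← pow_add]; congr 1; omega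
      have e2 : (10:Nat) ^ (2*h) = 10 ^ h * 10 ^ h := by rw [← pow_add]; congr 1; omega
      have hb1' : (10:Nat) ^ (2*h-1) ≤ n := by rw [show 2*h-1 = L-1 by omega]; exact hb1
      have hb2' : n < (10:Nat) ^ (2*h) := by rw [show 2*h = L by omega]; exact hb2
      have hal : 10 ^ (h-1) ≤ a := by
        rw [hadef, Nat.le_div_iff_mul_le hph, ← e1]; exact hb1'
      have hau : a < 10 ^ h := by
        rw [hadef]; apply Nat.div_lt_of_lt_mul; rw [← e2]; exact hb2'
      have hapos : 0 < a := lt_of_lt_of_le (pow_pos (by norm_num) _) hal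
      have hsplit : pvDigs n = pvDigs a ++ pvPad h b := by
        have hs := pvDigs_split h a b hapos hbl
        rw [hnab] at hs; exact hs
      have hlena : (pvDigs a).length = h := by
        obtain ⟨c1, c2⟩ := pvDigs_bounds a hapos
        exact pvLenUnique a _ h (pvDigs_length_pos a) hhpos c1 c2 hal hau
      rw [hsplit, List.take_left' hlena, List.drop_left' hlena] at heq
      have hpa : pvPad h a = pvDigs a := pvPad_eq_pvDigs h a hhpos hal hau
      have hab : a = b := pvPad_inj h a b hau hbl (hpa.trans heq)
      refine ⟨h, (a : Int), hhpos, by exact_mod_cast hal, by exact_mod_cast hau, ?_⟩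
      rw [← hid, show n = a * 10 ^ h + a by omega]
      push_cast
      ring
    · rintro ⟨k, fh, hk1, hlo, hhi, hveq⟩
      have hfpos : (0:Int) < fh := lt_of_lt_of_le (pow_pos (by norm_num) _) hlo
      set fn := fh.toNat with hfndef
      have hfh : (fn : Int) = fh := Int.toNat_of_nonneg (by omega)
      have hnval : n = fn * (10 ^ k + 1) := by
        have h0 : (n:Int) = (fn:Int) * ((10:Int) ^ k + 1) := by rw [hid, hfh]; exact hveq
        have h1 : (n:Int) = ((fn * (10 ^ k + 1) : Nat) : Int) := by push_cast; exact h0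
        exact_mod_cast h1
      have hlo' : 10 ^ (k-1) ≤ fn := by
        have h0 : ((10:Int) ^ (k-1)) ≤ (fn:Int) := by rw [hfh]; exact hlo
        exact_mod_cast h0
      have hhi' : fn < 10 ^ k := by
        have h0 : (fn:Int) < (10:Int) ^ k := by rw [hfh]; exact hhi
        exact_mod_cast h0
      have hph : (0:Nat) < 10 ^ k := pow_pos (by norm_num) k
      have e1 : (10:Nat) ^ (2*k-1) = 10 ^ (k-1) * 10 ^ k := by rw [← pow_add]; congr 1; omega
      have hcb1 : 10 ^ (2*k-1) ≤ n := by
        rw [hnval, e1]; exact Nat.mul_le_mul hlo' (by omega)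
      have hcb2 : n < 10 ^ (2*k) := by
        have e2 : (10:Nat) ^ (2*k) = 10 ^ k * 10 ^ k := by rw [← pow_add]; congr 1; omega
        have hexp : fn * (10 ^ k + 1) = fn * 10 ^ k + fn := by ring
        have hstep : (fn + 1) * 10 ^ k = fn * 10 ^ k + 10 ^ k := by ring
        have hmul : (fn + 1) * 10 ^ k ≤ 10 ^ k * 10 ^ k := by
          rw [mul_comm ((10:Nat) ^ k) (10 ^ k)]
          exact Nat.mul_le_mul_right _ (by omega)
        omega
      have hLk : L = 2 * k :=
        pvLenUnique n L (2*k) hLpos (by omega) hb1 hb2 hcb1 hcb2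
      refine ⟨by omega, ?_⟩
      rw [show L / 2 = k by omega]
      have hsplit : pvDigs n = pvDigs fn ++ pvPad k fn := by
        have hs := pvDigs_split k fn fn (by omega) hhi'
        rw [show fn * 10 ^ k + fn = n by rw [hnval]; ring] at hs
        exact hs
      have hfnpos : 0 < fn := lt_of_lt_of_le (pow_pos (by norm_num) _) hlo'
      have hlenf : (pvDigs fn).length = k := by
        obtain ⟨c1, c2⟩ := pvDigs_bounds fn hfnpos
        exact pvLenUnique fn _ k (pvDigs_length_pos fn) hk1 c1 c2 hlo' hhi'
      rw [hsplit, List.take_left' hlenf, List.drop_left' hlenf,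
        pvPad_eq_pvDigs k fn hk1 hlo' hhi']

theorem pvPortA_eq_filter (start end_ : Int) :
    get_ids_with_digit_sequence_repeating_twice start end_
      = (PySem.List.pyRange start (end_ + 1) 1).filter pvTest := by
  unfold get_ids_with_digit_sequence_repeating_twice
  refine Eq.trans (PySem.List.foldl_congr_mem _ _
      (fun result id => if pvTest id then result ++ [id] else result) _ ?_) ?_
  · intro acc x _
    simp only [pvTest]
    split_ifs <;> simp_all
  · rw [PySem.List.foldl_append_if_eq_filter]
    simp

theorem pvPow_le {a b : Nat} (h : a ≤ b) : (10:Int) ^ a ≤ 10 ^ b :=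
  pow_le_pow_right₀ (by norm_num) h

theorem pvCand_split (k : Nat) (hk : 1 ≤ k) :
    (10:Int) ^ (k-1) * (10 ^ k + 1) = 10 ^ (2*k-1) + 10 ^ (k-1) := by
  have e : (10:Int) ^ (2*k-1) = 10 ^ (k-1) * 10 ^ k := by rw [← pow_add]; congr 1; omega
  rw [e]; ring

theorem pvCand_lb (k : Nat) (fh v : Int) (hk : 1 ≤ k) (hlo : (10:Int) ^ (k-1) ≤ fh)
    (hv : v = fh * (10 ^ k + 1)) : (10:Int) ^ (2*k-1) + 10 ^ (k-1) ≤ v := by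
  rw [← pvCand_split k hk, hv]
  exact mul_le_mul_of_nonneg_right hlo (by positivity)

theorem pvCand_ub (k : Nat) (fh v : Int) (hhi : fh < 10 ^ k)
    (hv : v = fh * (10 ^ k + 1)) : v ≤ 10 ^ (2*k) - 1 := by
  have e : (10:Int) ^ (2*k) = 10 ^ k * 10 ^ k := by rw [← pow_add]; congr 1; omega
  have h1 : fh ≤ 10 ^ k - 1 := by omega
  have h2 := mul_le_mul_of_nonneg_right h1 (show (0:Int) ≤ 10 ^ k + 1 by positivity)
  have e2 : ((10:Int) ^ k - 1) * (10 ^ k + 1) = 10 ^ (2*k) - 1 := by rw [e]; ring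
  rw [hv]; linarith

theorem pvCand_mono (k k' : Nat) (hkk : k ≤ k') :
    (10:Int) ^ (2*k-1) + 10 ^ (k-1) ≤ 10 ^ (2*k'-1) + 10 ^ (k'-1) := by
  have h1 := pvPow_le (show 2*k-1 ≤ 2*k'-1 by omega)
  have h2 := pvPow_le (show k-1 ≤ k'-1 by omega)
  linarith

theorem pvAltLoop_mem (start end_ : Int) (k : Nat) (hk : 1 ≤ k) (v : Int) :
    v ∈ pvAltLoop start end_ k ↔
      (start ≤ v ∧ v ≤ end_ ∧
        ∃ k' : Nat, ∃ fh : Int, k ≤ k' ∧ (10:Int) ^ (k'-1) ≤ fh ∧ fh < 10 ^ k' ∧ v = fh * (10 ^ k' + 1)) := by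
  have hm : (0:Int) < 10 ^ k + 1 := by positivity
  have hceil : ∀ fh : Int, (-(PySem.Int.floordiv (-start) (10 ^ k + 1)) ≤ fh) ↔ start ≤ fh * (10 ^ k + 1) := by
    intro fh
    rw [neg_le, PySem.Int.le_floordiv_iff_mul_le hm, neg_mul, neg_le_neg_iff]
  have hfloor : ∀ fh : Int, fh ≤ PySem.Int.floordiv end_ (10 ^ k + 1) ↔ fh * (10 ^ k + 1) ≤ end_ :=
    fun fh => PySem.Int.le_floordiv_iff_mul_le hm
  rw [pvAltLoop]
  by_cases hcond : (10:Int) ^ (2*k - 1) + 10 ^ (k - 1) ≤ end_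
  · rw [dif_pos hcond]
    have IH := pvAltLoop_mem start end_ (k+1) (by omega) v
    simp only [List.mem_append, List.mem_map, PySem.List.mem_pyRange_one, IH]
    constructor
    · rintro (⟨fh, ⟨hlo, hhi⟩, hv⟩ | ⟨hs, he, k', fh, hkk', h1, h2, h3⟩)
      · rw [max_le_iff] at hlo
        have hmin1 := le_min_iff.mp (show fh ≤ min ((10:Int) ^ k - 1) (PySem.Int.floordiv end_ (10 ^ k + 1)) by omega)
        refine ⟨?_, ?_, k, fh, le_rfl, hlo.1, by omega, hv.symm⟩
        · rw [← hv]; exact (hceil fh).mp hlo.2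
        · rw [← hv]; exact (hfloor fh).mp hmin1.2
      · exact ⟨hs, he, k', fh, by omega, h1, h2, h3⟩
    · rintro ⟨hs, he, k', fh, hkk', hlo', hhi', hv⟩
      by_cases hk'k : k' = k
      · subst hk'k
        left
        refine ⟨fh, ⟨?_, ?_⟩, hv.symm⟩
        · exact max_le hlo' ((hceil fh).mpr (hv ▸ hs))
        · have h1 := (hfloor fh).mpr (hv ▸ he)
          omega
      · right
        exact ⟨hs, he, k', fh, by omega, hlo', hhi', hv⟩
  · rw [dif_neg hcond]
    simp only [List.not_mem_nil, false_iff]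
    rintro ⟨hs, he, k', fh, hkk', hlo', hhi', hv⟩
    have h1 := pvCand_lb k' fh v (by omega) hlo' hv
    have h2 := pvCand_mono k k' hkk'
    linarith
termination_by (end_ + 1 - 10 ^ (2*k - 1)).toNat
decreasing_by
  have h1 : (10:Int) ^ (2*k - 1) < 10 ^ (2*(k+1) - 1) := by
    apply pow_lt_pow_right₀ (by norm_num) (by omega)
  have h2 : (0:Int) < 10 ^ (k - 1) := pow_pos (by norm_num) _
  omega

theorem pvAltLoop_pairwise (start end_ : Int) (k : Nat) (hk : 1 ≤ k) :
    (pvAltLoop start end_ k).Pairwise (· < ·) := by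
  have hm : (0:Int) < 10 ^ k + 1 := by positivity
  rw [pvAltLoop]
  by_cases hcond : (10:Int) ^ (2*k - 1) + 10 ^ (k - 1) ≤ end_
  · rw [dif_pos hcond]
    apply List.pairwise_append.mpr
    refine ⟨?_, pvAltLoop_pairwise start end_ (k+1) (by omega), ?_⟩
    · exact List.Pairwise.map _ (fun a b hab => mul_lt_mul_of_pos_right hab hm)
        (PySem.List.pairwise_lt_pyRange_one _ _)
    · intro a ha b hb
      obtain ⟨fh, hfh, rfl⟩ := List.mem_map.mp ha
      rw [PySem.List.mem_pyRange_one] at hfh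
      have hminle := min_le_left ((10:Int) ^ k - 1) (PySem.Int.floordiv end_ (10 ^ k + 1))
      have hub : fh * (10 ^ k + 1) ≤ 10 ^ (2*k) - 1 :=
        pvCand_ub k fh _ (by omega) rfl
      obtain ⟨_, _, k', fh', hkk', hlo', _, hv⟩ :=
        (pvAltLoop_mem start end_ (k+1) (by omega) b).mp hb
      have hlb := pvCand_lb k' fh' b (by omega) hlo' hv
      have hmono := pvCand_mono (k+1) k' hkk'
      have hpow : (10:Int) ^ (2*k) < 10 ^ (2*(k+1) - 1) :=
        pow_lt_pow_right₀ (by norm_num) (by omega)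
      have hpow2 : (0:Int) < 10 ^ ((k+1) - 1) := pow_pos (by norm_num) _
      linarith
  · rw [dif_neg hcond]
    exact List.Pairwise.nil
termination_by (end_ + 1 - 10 ^ (2*k - 1)).toNat
decreasing_by
  have h1 : (10:Int) ^ (2*k - 1) < 10 ^ (2*(k+1) - 1) := by
    apply pow_lt_pow_right₀ (by norm_num) (by omega)
  have h2 : (0:Int) < 10 ^ (k - 1) := pow_pos (by norm_num) _
  omega

theorem pvSortedExt (l₁ l₂ : List Int) (h₁ : l₁.Pairwise (· < ·)) (h₂ : l₂.Pairwise (· < ·))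
    (hmem : ∀ v, v ∈ l₁ ↔ v ∈ l₂) : l₁ = l₂ := by
  have n1 : l₁.Nodup := h₁.imp (fun h => ne_of_lt h)
  have n2 : l₂.Nodup := h₂.imp (fun h => ne_of_lt h)
  exact List.Perm.eq_of_pairwise (fun a b _ _ h h' => le_antisymm h h')
    (h₁.imp le_of_lt) (h₂.imp le_of_lt) ((List.perm_ext_iff_of_nodup n1 n2).mpr hmem)

-- ===== VERDICT (by name: the statement is the Claim_ definition above) =====
theorem get_ids_with_digit_sequence_repeating_twice_spec : Claim_equal_get_ids_with_digit_sequence_repeating_twice := by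
  intro start end_ _
  unfold Spec_get_ids_with_digit_sequence_repeating_twice
  rw [pvPortA_eq_filter, show get_ids_with_digit_sequence_repeating_twice_alt start end_ = pvAltLoop start end_ 1 from rfl]
  apply pvSortedExt
  · exact (PySem.List.pairwise_lt_pyRange_one start (end_+1)).filter _
  · exact pvAltLoop_pairwise start end_ 1 le_rfl
  · intro v
    rw [List.mem_filter, PySem.List.mem_pyRange_one, pvTest_iff,
      pvAltLoop_mem start end_ 1 le_rfl]
    unfold pvGood
    constructor
    · rintro ⟨⟨h1, h2⟩, k, fh, hk, hf⟩
      exact ⟨h1, by omega, k, fh, hk, hf⟩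
    · rintro ⟨h1, h2, k, fh, hk, hf⟩
      exact ⟨⟨h1, by omega⟩, k, fh, hk, hf⟩
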